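-- pv_equiv track=rewrite | github.com/Vagacoder/HackerRank | src/practice/Robox/Rob03.py | largestSubgrid
-- ===== SOURCE A (Python) =====
-- def largestSubgrid(grid, maxSum: int) -> int:
--     n: int = len(grid)
--     sizeWithMaxSum = {}
--
--     for size in range(n):
--         step = n - size + 1;
--         maxCurSizeSum = 0
--
--         for rStart in range(step):
--             for cStart in range(step):
--                 curSizeSum = sum(grid, rStart, cStart, size)
--                 if curSizeSum > maxCurSizeSum :
--                     maxCurSizeSum = curSizeSum
--
--         sizeWithMaxSum[size] = maxCurSizeSum
--
--     maxMaxSum = -1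
--     maxSize = -1
--     for size, sizeMaxSum in sizeWithMaxSum.items():
--         if sizeMaxSum <= maxSum and sizeMaxSum > maxMaxSum :
--             maxMaxSum = sizeMaxSum
--             maxSize = size
--
--     return maxSize
--
-- def sum(grid, rs:int, cs:int, size:int) -> int:
--     n = len(grid)
--     sum = 0
--
--     for r in range(rs, rs+size):
--         for c in range(cs, cs+size):
--             sum += grid[r][c]
--
--     return sum
-- ===== SOURCE B (Python) =====
-- def largestSubgrid(grid, maxSum: int) -> int:
--     n = len(grid)
--     # per-row prefix sums over the first n columns: prefs[r][j] = sum(grid[r][:j])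
--     prefs = []
--     for row in grid:
--         p = [0]
--         acc = 0
--         for x in row[:n]:
--             acc += x
--             p.append(acc)
--         prefs.append(p)
--     bestVal = -1
--     bestSize = -1
--     for size in range(n):
--         bound = n - size + 1
--         m = 0
--         for r in range(bound):
--             for c in range(bound):
--                 s = 0
--                 for rr in range(r, r + size):
--                     p = prefs[rr]
--                     s += p[c + size] - p[c]
--                 if s > m:
--                     m = s
--         if m <= maxSum and m > bestVal:
--             bestVal = m
--             bestSize = size
--     return bestSize
-- ===== Notes on version B (the rewrite author's own statement) =====
-- stated objective: faster
-- what changed: B precomputes per-row prefix sums once and fuses the size->max table and final selection into one loop, so each row of a candidate subgrid costs one subtraction instead of an element-by-element rescan, replacing A's O(n^5) nested summation (and its dict of per-size maxima) by an O(n^4) scan.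
import Mathlib
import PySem

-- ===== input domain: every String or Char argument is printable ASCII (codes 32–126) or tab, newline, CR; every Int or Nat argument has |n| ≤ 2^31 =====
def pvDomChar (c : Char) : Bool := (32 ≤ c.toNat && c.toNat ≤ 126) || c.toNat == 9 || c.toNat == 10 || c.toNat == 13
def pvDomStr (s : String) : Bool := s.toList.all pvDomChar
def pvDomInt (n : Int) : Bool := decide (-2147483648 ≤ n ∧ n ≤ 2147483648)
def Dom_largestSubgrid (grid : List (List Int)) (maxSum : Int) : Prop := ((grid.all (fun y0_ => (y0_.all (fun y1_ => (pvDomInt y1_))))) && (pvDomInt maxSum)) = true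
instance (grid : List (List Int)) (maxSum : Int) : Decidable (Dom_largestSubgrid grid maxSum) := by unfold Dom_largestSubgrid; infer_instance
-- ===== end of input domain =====

-- B replaces A's per-subgrid element-by-element summation by per-row prefix sums
-- (one subtraction per row of a subgrid); return values agree on Pre_largestSubgrid.

-- ===== PORT A =====
-- grid[r][c]: pyGet? = none is Python's IndexError; the `.getD` totalization is only
-- reached outside Pre_largestSubgrid.
def sumA (grid : List (List Int)) (rs cs size : Int) : Int :=
  List.foldl (fun s r =>
      List.foldl (fun s c =>
          s + (PySem.List.pyGet? ((PySem.List.pyGet? grid r).getD []) c).getD 0)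
        s (PySem.List.pyRange cs (cs + size)))
    0 (PySem.List.pyRange rs (rs + size))

def largestSubgrid (grid : List (List Int)) (maxSum : Int) : Int :=
  let n : Int := (grid.length : Int)
  let sizeWithMaxSum : PySem.Dict Int Int :=
    List.foldl (fun d size =>
        let step := n - size + 1
        let maxCurSizeSum :=
          List.foldl (fun m rStart =>
              List.foldl (fun m cStart =>
                  let curSizeSum := sumA grid rStart cStart size
                  if curSizeSum > m then curSizeSum else m)
                m (PySem.List.pyRange 0 step))
            0 (PySem.List.pyRange 0 step)
        d.insert size maxCurSizeSum)
      PySem.Dict.empty (PySem.List.pyRange 0 n)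
  let fin : Int × Int :=
    List.foldl (fun (st : Int × Int) p =>
        if p.2 ≤ maxSum ∧ st.1 < p.2 then (p.2, p.1) else st)
      (-1, -1) sizeWithMaxSum.items
  fin.2

-- ===== PORT B =====
def prefRow (row : List Int) (n : Int) : List Int :=
  (List.foldl (fun (st : List Int × Int) x => (st.1 ++ [st.2 + x], st.2 + x))
    ([0], 0) (PySem.List.slice row none (some n))).1

-- prefs[rr][j]: as in port A, the `.getD` totalization is only reached outside Pre_largestSubgrid.
def largestSubgrid_alt (grid : List (List Int)) (maxSum : Int) : Int :=
  let n : Int := (grid.length : Int)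
  let prefs : List (List Int) :=
    List.foldl (fun ps row => ps ++ [prefRow row n]) [] grid
  let fin : Int × Int :=
    List.foldl (fun (st : Int × Int) size =>
        let bound := n - size + 1
        let m :=
          List.foldl (fun m r =>
              List.foldl (fun m c =>
                  let s :=
                    List.foldl (fun s rr =>
                        let p := (PySem.List.pyGet? prefs rr).getD []
                        s + ((PySem.List.pyGet? p (c + size)).getD 0
                              - (PySem.List.pyGet? p c).getD 0))
                      0 (PySem.List.pyRange r (r + size))
                  if s > m then s else m)
                m (PySem.List.pyRange 0 bound))
            0 (PySem.List.pyRange 0 bound)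
        if m ≤ maxSum ∧ st.1 < m then (m, size) else st)
      (-1, -1) (PySem.List.pyRange 0 n)
  fin.2

-- ===== PRECONDITION & SPEC =====
-- Pre_ excludes exactly the ragged grids on which A raises IndexError: with n = len(grid) ≥ 2,
-- A reads grid[r][c] for every r, c < n, so it raises iff some row is shorter than n
-- (for n ≤ 1 no element is ever read and A returns).
def Pre_largestSubgrid (grid : List (List Int)) (maxSum : Int) : Prop :=
  grid.length ≤ 1 ∨ ∀ row ∈ grid, grid.length ≤ row.length
instance (grid : List (List Int)) (maxSum : Int) : Decidable (Pre_largestSubgrid grid maxSum) := by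
  unfold Pre_largestSubgrid; infer_instance

def pvWitness_largestSubgrid : List (List Int) × Int := ([[1, 2], [3, -4]], 3)

def Spec_largestSubgrid (grid : List (List Int)) (maxSum : Int) (out : Int) : Prop := out = largestSubgrid_alt grid maxSum
instance (grid : List (List Int)) (maxSum : Int) (out : Int) : Decidable (Spec_largestSubgrid grid maxSum out) := by unfold Spec_largestSubgrid; infer_instance

-- ===== CLAIM (what is proved, stated in full; the proofs are below) =====
def Claim_equal_largestSubgrid : Prop := ∀ (grid : List (List Int)) (maxSum : Int), Dom_largestSubgrid grid maxSum → Pre_largestSubgrid grid maxSum → Spec_largestSubgrid grid maxSum (largestSubgrid grid maxSum)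

-- ===== LEMMAS AND PROOFS =====

-- A's element read grid[r][c] (totalized as in the ports)
def eltA (grid : List (List Int)) (r c : Int) : Int :=
  (PySem.List.pyGet? ((PySem.List.pyGet? grid r).getD []) c).getD 0

-- the per-size inner double loop of A
def MA (grid : List (List Int)) (size : Int) : Int :=
  List.foldl (fun m rStart =>
      List.foldl (fun m cStart =>
          let curSizeSum := sumA grid rStart cStart size
          if curSizeSum > m then curSizeSum else m)
        m (PySem.List.pyRange 0 ((grid.length : Int) - size + 1)))
    0 (PySem.List.pyRange 0 ((grid.length : Int) - size + 1))

-- B's prefix table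
def prefsOf (grid : List (List Int)) : List (List Int) :=
  grid.map (fun row => prefRow row (grid.length : Int))

-- the per-size inner double loop of B, over an arbitrary prefix table
def MBwith (grid : List (List Int)) (prefs : List (List Int)) (size : Int) : Int :=
  List.foldl (fun m r =>
      List.foldl (fun m c =>
          let s :=
            List.foldl (fun s rr =>
                let p := (PySem.List.pyGet? prefs rr).getD []
                s + ((PySem.List.pyGet? p (c + size)).getD 0
                      - (PySem.List.pyGet? p c).getD 0))
              0 (PySem.List.pyRange r (r + size))
          if s > m then s else m)
        m (PySem.List.pyRange 0 ((grid.length : Int) - size + 1)))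
    0 (PySem.List.pyRange 0 ((grid.length : Int) - size + 1))

-- the per-size inner double loop of B
def MB (grid : List (List Int)) (size : Int) : Int :=
  List.foldl (fun m r =>
      List.foldl (fun m c =>
          let s :=
            List.foldl (fun s rr =>
                let p := (PySem.List.pyGet? (prefsOf grid) rr).getD []
                s + ((PySem.List.pyGet? p (c + size)).getD 0
                      - (PySem.List.pyGet? p c).getD 0))
              0 (PySem.List.pyRange r (r + size))
          if s > m then s else m)
        m (PySem.List.pyRange 0 ((grid.length : Int) - size + 1)))
    0 (PySem.List.pyRange 0 ((grid.length : Int) - size + 1))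

theorem pyRange_add_natCast (a s : Nat) :
    PySem.List.pyRange (a : Int) ((a : Int) + (s : Int)) =
      (List.range s).map (fun u => ((a + u : Nat) : Int)) := by
  induction s with
  | zero => simp [PySem.List.pyRange_one_eq_nil]
  | succ s ih =>
      have h : ((a : Int) + ((s + 1 : Nat) : Int)) = ((a : Int) + (s : Int)) + 1 := by
        push_cast; ring
      rw [h, PySem.List.pyRange_one_succ_right (by omega), ih, List.range_succ]
      push_cast; simp

-- the prefix-building loop of B, characterized
theorem prefFold (t : List Int) (p0 : List Int) (a0 : Int) :
    List.foldl (fun (st : List Int × Int) x => (st.1 ++ [st.2 + x], st.2 + x)) (p0, a0) t =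
      (p0 ++ (List.range t.length).map (fun j => a0 + (t.take (j + 1)).sum), a0 + t.sum) := by
  induction t generalizing p0 a0 with
  | nil => simp
  | cons x t ih =>
      simp only [List.foldl_cons, ih, List.length_cons, List.range_succ_eq_map, List.map_cons,
        List.map_map, Prod.mk.injEq]
      constructor
      · simp only [List.take_succ_cons, List.sum_cons, List.append_assoc, List.singleton_append]
        congr 2
        · simp
        · apply List.map_congr_left
          intro j _
          simp [Function.comp, add_assoc]
      · simp [add_assoc]

theorem prefRow_eq (row : List Int) (k : Nat) (hk : k ≤ row.length) :
    prefRow row (k : Int) =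
      (List.range (k + 1)).map (fun j => ((row.take k).take j).sum) := by
  unfold prefRow
  rw [PySem.List.slice_to row (by positivity), Int.toNat_natCast, prefFold]
  have hlen : (row.take k).length = k := by simp [hk]
  rw [hlen, List.range_succ_eq_map, List.map_cons, List.map_map]
  simp

theorem take_sum_sub (t : List Int) (a s : Nat) (h : a + s ≤ t.length) :
    (t.take (a + s)).sum - (t.take a).sum =
      ((List.range s).map (fun u => t.getD (a + u) 0)).sum := by
  induction s with
  | zero => simp
  | succ s ih =>
      have h' : a + s ≤ t.length := by omega
      have hlt : a + s < t.length := by omega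
      have hstep : t.take (a + (s + 1)) = t.take (a + s) ++ [t.getD (a + s) 0] := by
        have h1 : a + (s + 1) = (a + s) + 1 := by omega
        rw [h1, List.take_add_one]
        congr 1
        rw [List.getElem?_eq_getElem hlt]
        simp [List.getD, List.getElem?_eq_getElem hlt]
      rw [hstep, List.range_succ]
      simp only [List.sum_append, List.map_append, List.map_cons, List.map_nil, List.sum_cons,
        List.sum_nil]
      have := ih h'
      omega

-- core: one row's contribution to a subgrid sum, via prefix differences
theorem core_row (grid : List (List Int)) (i a s : Nat)
    (hi : i < grid.length)
    (hrow : grid.length ≤ grid[i].length)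
    (hb : a + s ≤ grid.length) :
    (PySem.List.pyGet? (prefRow grid[i] (grid.length : Int)) ((a : Int) + (s : Int))).getD 0
      - (PySem.List.pyGet? (prefRow grid[i] (grid.length : Int)) (a : Int)).getD 0
    = ((PySem.List.pyRange (a : Int) ((a : Int) + (s : Int))).map (eltA grid (i : Int))).sum := by
  set k := grid.length with hk
  have hcast : ((a : Int) + (s : Int)) = (((a + s : Nat)) : Int) := by push_cast; ring
  rw [prefRow_eq _ k hrow, hcast, PySem.List.pyGet?_natCast, PySem.List.pyGet?_natCast,
    ← List.getD_eq_getElem?_getD, ← List.getD_eq_getElem?_getD,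
    PySem.List.getD_map_range _ _ _ _ (by omega), PySem.List.getD_map_range _ _ _ _ (by omega)]
  set t := grid[i].take k with ht
  have htlen : t.length = k := by simp [ht]; omega
  rw [take_sum_sub t a s (by omega), ← hcast, pyRange_add_natCast, List.map_map]
  congr 1
  apply List.map_congr_left
  intro u hu
  have hu' : u < s := List.mem_range.mp hu
  show t.getD (a + u) 0 = eltA grid (i : Int) ((a + u : Nat) : Int)
  unfold eltA
  rw [PySem.List.pyGet?_natCast grid i, List.getElem?_eq_getElem hi, Option.getD_some,
    PySem.List.pyGet?_natCast, ← List.getD_eq_getElem?_getD, ht,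
    List.getD_eq_getElem?_getD, List.getD_eq_getElem?_getD, List.getElem?_take]
  simp [show a + u < k by omega]

-- A's helper `sum` as a sum of row segments
theorem sumA_eq (grid : List (List Int)) (rs cs size : Int) :
    sumA grid rs cs size =
      ((PySem.List.pyRange rs (rs + size)).map
        (fun rr => ((PySem.List.pyRange cs (cs + size)).map (eltA grid rr)).sum)).sum := by
  unfold sumA
  rw [PySem.List.foldl_congr_mem _ _
        (fun s r => s + ((PySem.List.pyRange cs (cs + size)).map (eltA grid r)).sum) 0
        (by intro acc r _
            rw [PySem.List.foldl_add]
            rfl),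
      PySem.List.foldl_add]
  simp

-- the subgrid sum of A equals the prefix-difference sum of B
theorem inner_eq (grid : List (List Int))
    (hP : 2 ≤ grid.length → ∀ row ∈ grid, grid.length ≤ row.length)
    (size rStart cStart : Int)
    (hs0 : 0 ≤ size) (hsn : size < (grid.length : Int))
    (hr : 0 ≤ rStart) (hrb : rStart < (grid.length : Int) - size + 1)
    (hc : 0 ≤ cStart) (hcb : cStart < (grid.length : Int) - size + 1) :
    sumA grid rStart cStart size =
      List.foldl (fun s rr =>
          let p := (PySem.List.pyGet? (prefsOf grid) rr).getD []
          s + ((PySem.List.pyGet? p (cStart + size)).getD 0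
                - (PySem.List.pyGet? p cStart).getD 0))
        0 (PySem.List.pyRange rStart (rStart + size)) := by
  rw [sumA_eq,
      PySem.List.foldl_congr_mem _ _
        (fun s rr =>
          s + (((PySem.List.pyGet? ((PySem.List.pyGet? (prefsOf grid) rr).getD [])
                  (cStart + size)).getD 0)
               - ((PySem.List.pyGet? ((PySem.List.pyGet? (prefsOf grid) rr).getD [])
                  cStart).getD 0))) 0
        (by intro acc rr _; rfl),
      PySem.List.foldl_add, zero_add]
  congr 1
  apply List.map_congr_left
  intro rr hrr
  obtain ⟨hrr1, hrr2⟩ := PySem.List.mem_pyRange_one.mp hrr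
  -- bounds force size ≥ 1, hence grid.length ≥ 2
  have hsz1 : 1 ≤ size := by omega
  have hrow : ∀ row ∈ grid, (grid.length : Int) ≤ (row.length : Int) := by
    intro row hm
    exact_mod_cast hP (by omega) row hm
  lift size to Nat using hs0 with sN
  lift cStart to Nat using hc with a
  lift rr to Nat using (by omega) with i
  have hi : i < grid.length := by omega
  have hb : a + sN ≤ grid.length := by omega
  have hgi : (PySem.List.pyGet? (prefsOf grid) (i : Int)).getD []
      = prefRow grid[i] (grid.length : Int) := by
    unfold prefsOf
    rw [PySem.List.pyGet?_natCast, List.getElem?_map, List.getElem?_eq_getElem hi]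
    rfl
  rw [hgi]
  exact (core_row grid i a sN hi
    (by exact_mod_cast hrow grid[i] (grid.getElem_mem hi)) hb).symm

-- the per-size maxima agree
theorem M_eq (grid : List (List Int))
    (hP : 2 ≤ grid.length → ∀ row ∈ grid, grid.length ≤ row.length)
    (size : Int) (hs0 : 0 ≤ size) (hsn : size < (grid.length : Int)) :
    MA grid size = MB grid size := by
  unfold MA MB
  apply PySem.List.foldl_congr_mem
  intro m rStart hrS
  obtain ⟨hr1, hr2⟩ := PySem.List.mem_pyRange_one.mp hrS
  apply PySem.List.foldl_congr_mem
  intro m' cStart hcS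
  obtain ⟨hc1, hc2⟩ := PySem.List.mem_pyRange_one.mp hcS
  simp only []
  rw [inner_eq grid hP size rStart cStart hs0 hsn hr1 hr2 hc1 hc2]

-- A rewritten as a single selection fold over the sizes
theorem A_eq_fold (grid : List (List Int)) (maxSum : Int) :
    largestSubgrid grid maxSum =
      (List.foldl (fun (st : Int × Int) size =>
          if MA grid size ≤ maxSum ∧ st.1 < MA grid size then (MA grid size, size) else st)
        (-1, -1) (PySem.List.pyRange 0 (grid.length : Int))).2 := by
  show (List.foldl (fun (st : Int × Int) p =>
        if p.2 ≤ maxSum ∧ st.1 < p.2 then (p.2, p.1) else st)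
      (-1, -1)
      (List.foldl (fun (d : PySem.Dict Int Int) size =>
          d.insert size (MA grid size))
        PySem.Dict.empty (PySem.List.pyRange 0 (grid.length : Int))).items).2 = _
  rw [PySem.Dict.items_foldl_insert_fresh _ (fun size => size) (fun size => MA grid size)
        PySem.Dict.empty
        (by intro a _; exact PySem.Dict.contains_empty a)
        (by rw [List.map_id', PySem.List.pyRange_zero_natCast]
            exact (List.nodup_range).map (fun _ _ h => by exact_mod_cast h))]
  rw [show (PySem.Dict.empty : PySem.Dict Int Int).items = [] from rfl, List.nil_append,
      List.foldl_map]

-- B rewritten the same way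
theorem B_eq_fold (grid : List (List Int)) (maxSum : Int) :
    largestSubgrid_alt grid maxSum =
      (List.foldl (fun (st : Int × Int) size =>
          if MB grid size ≤ maxSum ∧ st.1 < MB grid size then (MB grid size, size) else st)
        (-1, -1) (PySem.List.pyRange 0 (grid.length : Int))).2 := by
  show (List.foldl (fun (st : Int × Int) size =>
        let m := MBwith grid
              (List.foldl (fun ps row => ps ++ [prefRow row (grid.length : Int)]) [] grid) size
        if m ≤ maxSum ∧ st.1 < m then (m, size) else st)
      (-1, -1) (PySem.List.pyRange 0 (grid.length : Int))).2 = _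
  rw [PySem.List.foldl_append_singleton_eq_map, List.nil_append]
  rfl

-- ===== VERDICT (by name: the statement is the Claim_ definition above) =====
theorem largestSubgrid_spec : Claim_equal_largestSubgrid := by
  intro grid maxSum _ hpre
  have hP : 2 ≤ grid.length → ∀ row ∈ grid, grid.length ≤ row.length := by
    rcases hpre with h | h
    · intro h2; omega
    · intro _; exact h
  unfold Spec_largestSubgrid
  rw [A_eq_fold, B_eq_fold]
  congr 1
  apply PySem.List.foldl_congr_mem
  intro st size hs
  obtain ⟨h1, h2⟩ := PySem.List.mem_pyRange_one.mp hs
  rw [M_eq grid hP size h1 h2]
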